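-- pv_equiv track=rewrite | github.com/mvrogozov/algorithms | coderun/384.py | get_min_str
-- ===== SOURCE A (Python) =====
-- def get_min_str(a_str: str, b_str: str, c_str: str):
--     result = ''
--     a_sub = a_str
--     b_sub = b_str
--     c_sub = c_str
--     while a_sub and b_sub and c_sub:
--         if a_sub:
--             letter = a_sub[0]
--         elif b_sub:
--             letter = b_sub[0]
--         else:
--             letter = c_sub[0]
--         count_a = count_b = count_c = 0
--         if (b_sub and b_sub[0] != letter) or (c_sub and c_sub[0] != letter) or (a_sub and a_sub[0] != letter):
--             return 'IMPOSSIBLE'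
--         while a_sub and a_sub[0] == letter:
--             count_a += 1
--             a_sub = a_sub[1:]
--         while b_sub and b_sub[0] == letter:
--             count_b += 1
--             b_sub = b_sub[1:]
--         while c_sub and c_sub[0] == letter:
--             count_c += 1
--             c_sub = c_sub[1:]
--
--
--         s_max = max(count_a, count_b, count_c)
--         s_min = min(count_a, count_b, count_c)
--         amount = s_max - s_min
--         steeps_to_dif = abs(count_a - amount) + abs(count_b - amount) + abs(count_c - amount)
--         steeps_to_max = abs(count_a - s_max) + abs(count_b - s_max) + abs(count_c - s_max)
--         steeps_to_min = abs(count_a - s_min) + abs(count_b - s_min) + abs(count_c - s_min)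
--         steps_to_a = abs(2 * count_a - (abs(count_b) + abs(count_c)))
--         steps_to_b = abs(2 * count_b - (abs(count_a) + abs(count_c)))
--         steps_to_c = abs(2 * count_c - (abs(count_b) + abs(count_a)))
--         cur_min = min(steeps_to_dif, steeps_to_max, steeps_to_min, steps_to_a, steps_to_b, steps_to_c)
--         if cur_min == steeps_to_min:
--             amount = s_min
--         elif cur_min == steeps_to_max:
--             amount = s_max
--         elif cur_min == steps_to_a:
--             amount = count_a
--         elif cur_min == steps_to_b:
--             amount = count_b
--         elif cur_min == steps_to_c:
--             amount = count_c
--         # if amount == 0: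
--         #     amount = count_a
--         result += letter * amount
--     if a_sub or b_sub or c_sub:
--         return 'IMPOSSIBLE'
--     return result
-- ===== SOURCE B (Python) =====
-- def _rle(s):
--     """Run-length encode s as a list of [char, count] runs."""
--     runs = []
--     for ch in s:
--         if runs and runs[-1][0] == ch:
--             runs[-1][1] += 1
--         else:
--             runs.append([ch, 1])
--     return runs
--
--
-- def _amount(count_a, count_b, count_c):
--     """The custom count rule: pick the target repetition for one run triple."""
--     s_max = max(count_a, count_b, count_c)
--     s_min = min(count_a, count_b, count_c)
--     amount = s_max - s_min
--     steeps_to_dif = abs(count_a - amount) + abs(count_b - amount) + abs(count_c - amount)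
--     steeps_to_max = abs(count_a - s_max) + abs(count_b - s_max) + abs(count_c - s_max)
--     steeps_to_min = abs(count_a - s_min) + abs(count_b - s_min) + abs(count_c - s_min)
--     steps_to_a = abs(2 * count_a - (abs(count_b) + abs(count_c)))
--     steps_to_b = abs(2 * count_b - (abs(count_a) + abs(count_c)))
--     steps_to_c = abs(2 * count_c - (abs(count_b) + abs(count_a)))
--     cur_min = min(steeps_to_dif, steeps_to_max, steeps_to_min, steps_to_a, steps_to_b, steps_to_c)
--     if cur_min == steeps_to_min:
--         amount = s_min
--     elif cur_min == steeps_to_max: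
--         amount = s_max
--     elif cur_min == steps_to_a:
--         amount = count_a
--     elif cur_min == steps_to_b:
--         amount = count_b
--     elif cur_min == steps_to_c:
--         amount = count_c
--     return amount
--
--
-- def get_min_str(a_str: str, b_str: str, c_str: str):
--     ra, rb, rc = _rle(a_str), _rle(b_str), _rle(c_str)
--     if not (len(ra) == len(rb) == len(rc)):
--         return 'IMPOSSIBLE'
--     parts = []
--     for (x, na), (y, nb), (z, nc) in zip(ra, rb, rc):
--         if y != x or z != x:
--             return 'IMPOSSIBLE'
--         parts.append(x * _amount(na, nb, nc))
--     return ''.join(parts)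
-- ===== Notes on version B (the rewrite author's own statement) =====
-- stated objective: faster
-- what changed: B first run-length-encodes each of the three strings into (char,count) tables and then merges them in one aligned zip pass with a length check, instead of A's single while loop that repeatedly slices all three strings with inner character-consuming while loops; the six-metric count rule is kept verbatim.
import Mathlib
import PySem

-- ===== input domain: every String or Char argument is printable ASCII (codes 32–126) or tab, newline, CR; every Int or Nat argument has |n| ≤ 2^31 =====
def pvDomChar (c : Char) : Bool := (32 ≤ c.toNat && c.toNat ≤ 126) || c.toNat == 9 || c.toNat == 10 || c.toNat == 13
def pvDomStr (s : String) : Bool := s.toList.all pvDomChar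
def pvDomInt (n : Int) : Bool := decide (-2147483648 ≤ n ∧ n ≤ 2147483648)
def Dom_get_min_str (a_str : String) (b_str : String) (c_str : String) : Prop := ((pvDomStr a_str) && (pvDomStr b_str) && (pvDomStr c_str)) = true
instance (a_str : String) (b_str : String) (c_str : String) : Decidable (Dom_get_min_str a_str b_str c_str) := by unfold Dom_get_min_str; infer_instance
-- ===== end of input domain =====

-- B re-implements A by a different decomposition (precompute run-length tables, then merge
-- them in one aligned pass) with the same six-metric count rule; objective: alternative.

-- ===== PORT A =====

-- the six-metric amount rule, shared verbatim by both Pythons (A inline, B's `_amount` helper)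
def amountRule (count_a count_b count_c : Int) : Int :=
  let s_max := max count_a (max count_b count_c)
  let s_min := min count_a (min count_b count_c)
  let amount := s_max - s_min
  let steeps_to_dif := |count_a - amount| + |count_b - amount| + |count_c - amount|
  let steeps_to_max := |count_a - s_max| + |count_b - s_max| + |count_c - s_max|
  let steeps_to_min := |count_a - s_min| + |count_b - s_min| + |count_c - s_min|
  let steps_to_a := |2 * count_a - (|count_b| + |count_c|)|
  let steps_to_b := |2 * count_b - (|count_a| + |count_c|)|
  let steps_to_c := |2 * count_c - (|count_b| + |count_a|)|
  let cur_min := min steeps_to_dif (min steeps_to_max (min steeps_to_min (min steps_to_a (min steps_to_b steps_to_c))))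
  if cur_min = steeps_to_min then s_min
  else if cur_min = steeps_to_max then s_max
  else if cur_min = steps_to_a then count_a
  else if cur_min = steps_to_b then count_b
  else if cur_min = steps_to_c then count_c
  else amount

-- A's inner `while x_sub and x_sub[0] == letter` loop: count consumed, rest returned
def pvRunA (letter : Char) : List Char → Int × List Char
  | [] => (0, [])
  | ch :: rest =>
    if ch = letter then
      let p := pvRunA letter rest
      (p.1 + 1, p.2)
    else (0, ch :: rest)

theorem pvRunA_len_le (letter : Char) : ∀ l : List Char, (pvRunA letter l).2.length ≤ l.length := by
  intro l
  induction l with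
  | nil => simp [pvRunA]
  | cons ch rest ih =>
    simp only [pvRunA]
    split
    · exact le_trans ih (Nat.le_succ _)
    · simp

-- A's outer while loop, accumulating `result`
def pvLoopA (acc : List Char) : List Char → List Char → List Char → Option (List Char)
  | x :: as', hb :: bs', hc :: cs' =>
    -- letter = a_sub[0]; the elif branches of A are dead here (a_sub nonempty)
    if hb ≠ x ∨ hc ≠ x ∨ x ≠ x then none
    else
      let pa := pvRunA x (x :: as')
      let pb := pvRunA x (hb :: bs')
      let pc := pvRunA x (hc :: cs')
      pvLoopA (acc ++ List.replicate (amountRule pa.1 pb.1 pc.1).toNat x) pa.2 pb.2 pc.2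
  | a, b, c => if a = [] ∧ b = [] ∧ c = [] then some acc else none
termination_by a => a.length
decreasing_by
  simp only [pvRunA]
  exact Nat.lt_succ_of_le (pvRunA_len_le _ _)

def get_min_str (a_str : String) (b_str : String) (c_str : String) : String :=
  match pvLoopA [] a_str.toList b_str.toList c_str.toList with
  | none => "IMPOSSIBLE"
  | some l => String.ofList l

-- ===== PORT B =====

-- B's `_rle` loop body: runs kept reversed in the accumulator (runs[-1] = head)
def pvRleStep (runs : List (Char × Int)) (ch : Char) : List (Char × Int) :=
  match runs with
  | (c, n) :: rest => if c = ch then (c, n + 1) :: rest else (ch, 1) :: (c, n) :: rest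
  | [] => [(ch, 1)]

def pvRle (s : List Char) : List (Char × Int) :=
  (s.foldl pvRleStep []).reverse

-- B's zip loop over the three run tables (the length check is the catch-all arm)
def pvMerge : List (Char × Int) → List (Char × Int) → List (Char × Int) → Option (List Char)
  | [], [], [] => some []
  | (x, na) :: ra, (y, nb) :: rb, (z, nc) :: rc =>
    if y ≠ x ∨ z ≠ x then none
    else
      match pvMerge ra rb rc with
      | none => none
      | some rest => some (List.replicate (amountRule na nb nc).toNat x ++ rest)
  | _, _, _ => none

def get_min_str_alt (a_str : String) (b_str : String) (c_str : String) : String :=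
  match pvMerge (pvRle a_str.toList) (pvRle b_str.toList) (pvRle c_str.toList) with
  | none => "IMPOSSIBLE"
  | some l => String.ofList l

-- ===== PRECONDITION & SPEC =====
def Spec_get_min_str (a_str : String) (b_str : String) (c_str : String) (out : String) : Prop := out = get_min_str_alt a_str b_str c_str
instance (a_str : String) (b_str : String) (c_str : String) (out : String) : Decidable (Spec_get_min_str a_str b_str c_str out) := by unfold Spec_get_min_str; infer_instance

-- ===== CLAIM (what is proved, stated in full; the proofs are below) =====
def Claim_equal_get_min_str : Prop := ∀ (a_str : String) (b_str : String) (c_str : String), Dom_get_min_str a_str b_str c_str → Spec_get_min_str a_str b_str c_str (get_min_str a_str b_str c_str)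

-- ===== LEMMAS AND PROOFS =====

-- the foldl only ever touches the top run; a fixed tail rides along
theorem foldl_rleStep_tail :
    ∀ (s : List Char) (t : Char × Int) (ts rest : List (Char × Int)),
      List.foldl pvRleStep (t :: ts ++ rest) s = List.foldl pvRleStep (t :: ts) s ++ rest := by
  intro s
  induction s with
  | nil => intro t ts rest; simp
  | cons ch s' ih =>
    intro t ts rest
    obtain ⟨c, n⟩ := t
    by_cases h : c = ch
    · simpa [pvRleStep, h] using ih (c, n + 1) ts rest
    · simpa [pvRleStep, h] using ih (ch, 1) ((c, n) :: ts) rest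

-- folding from a singleton top run absorbs exactly the leading run
theorem foldl_rleStep_run :
    ∀ (s : List Char) (c : Char) (n : Int),
      List.foldl pvRleStep [(c, n)] s
        = List.foldl pvRleStep [(c, n + (pvRunA c s).1)] (pvRunA c s).2 := by
  intro s
  induction s with
  | nil => intro c n; simp [pvRunA]
  | cons ch s' ih =>
    intro c n
    by_cases h : ch = c
    · subst h
      simp only [pvRunA, List.foldl_cons, pvRleStep, if_true]
      rw [ih ch (n + 1)]
      ring_nf
    · simp [pvRunA, pvRleStep, h]

theorem pvRunA_rest (letter : Char) :
    ∀ l : List Char, (pvRunA letter l).2 = [] ∨ ∃ y ys, (pvRunA letter l).2 = y :: ys ∧ y ≠ letter := by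
  intro l
  induction l with
  | nil => left; simp [pvRunA]
  | cons ch rest ih =>
    by_cases h : ch = letter
    · simpa [pvRunA, h] using ih
    · right; exact ⟨ch, rest, by simp [pvRunA, h], h⟩

-- pvRle, characterized run-by-run
theorem pvRle_cons (x : Char) (s : List Char) :
    pvRle (x :: s) = (x, (pvRunA x s).1 + 1) :: pvRle (pvRunA x s).2 := by
  unfold pvRle
  simp only [List.foldl_cons, pvRleStep]
  rw [foldl_rleStep_run s x 1]
  rcases pvRunA_rest x s with h | ⟨y, ys, h, hy⟩
  · simp [h, add_comm]
  · rw [h]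
    simp only [List.foldl_cons, pvRleStep, if_neg (show ¬ x = y from fun hxy => hy hxy.symm)]
    rw [show ((y, (1:Int)) :: [(x, 1 + (pvRunA x s).1)]) = (y, (1:Int)) :: [] ++ [(x, 1 + (pvRunA x s).1)] from rfl,
        foldl_rleStep_tail]
    simp [add_comm]

theorem pvRle_nil : pvRle [] = [] := rfl

-- full run of A on the same letter: count of the whole list, head included
theorem pvRunA_cons_self (x : Char) (s : List Char) :
    pvRunA x (x :: s) = ((pvRunA x s).1 + 1, (pvRunA x s).2) := by
  simp [pvRunA]

-- the main simulation: A's accumulator loop = B's table merge, prefixed by acc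
theorem loopA_eq_merge_aux :
    ∀ (n : Nat) (a : List Char), a.length ≤ n → ∀ (b c acc : List Char),
      pvLoopA acc a b c = Option.map (acc ++ ·) (pvMerge (pvRle a) (pvRle b) (pvRle c)) := by
  intro n
  induction n with
  | zero =>
    intro a ha b c acc
    have : a = [] := List.eq_nil_of_length_eq_zero (Nat.le_zero.mp ha)
    subst this
    rcases b with _ | ⟨y, bs⟩ <;> rcases c with _ | ⟨z, cs⟩ <;>
      simp only [pvLoopA, pvRle_nil, pvRle_cons, pvMerge] <;> simp
  | succ n ih =>
    intro a ha b c acc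
    match a, b, c with
    | [], b, c =>
      rcases b with _ | ⟨y, bs⟩ <;> rcases c with _ | ⟨z, cs⟩ <;>
        simp only [pvLoopA, pvRle_nil, pvRle_cons, pvMerge] <;> simp
    | x :: as', [], c =>
      rcases c with _ | ⟨z, cs⟩ <;>
        simp only [pvLoopA, pvRle_nil, pvRle_cons, pvMerge] <;> simp
    | x :: as', hb :: bs', [] =>
      simp only [pvLoopA, pvRle_nil, pvRle_cons, pvMerge] <;> simp
    | x :: as', hb :: bs', hc :: cs' =>
      by_cases hmis : hb ≠ x ∨ hc ≠ x
      · have : (hb ≠ x ∨ hc ≠ x ∨ x ≠ x) := by tauto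
        rw [pvLoopA, if_pos this, pvRle_cons, pvRle_cons, pvRle_cons, pvMerge, if_pos hmis]
        rfl
      · rw [not_or, not_not, not_not] at hmis
        obtain ⟨hbx, hcx⟩ := hmis
        rw [hbx, hcx]
        rw [pvLoopA, if_neg (by simp)]
        simp only [pvRunA_cons_self]
        rw [pvRle_cons, pvRle_cons, pvRle_cons, pvMerge, if_neg (by simp)]
        have hlen : (pvRunA x as').2.length ≤ n := by
          have h1 := pvRunA_len_le x as'
          simp only [List.length_cons] at ha
          omega
        rw [ih _ hlen]
        rcases pvMerge (pvRle (pvRunA x as').2) (pvRle (pvRunA x bs').2) (pvRle (pvRunA x cs').2) with _ | rest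
        · rfl
        · simp [List.append_assoc]

theorem loopA_eq_merge (a b c acc : List Char) :
    pvLoopA acc a b c = Option.map (acc ++ ·) (pvMerge (pvRle a) (pvRle b) (pvRle c)) :=
  loopA_eq_merge_aux a.length a le_rfl b c acc

-- ===== VERDICT (by name: the statement is the Claim_ definition above) =====
theorem get_min_str_spec : Claim_equal_get_min_str := by
  intro a b c _
  unfold Spec_get_min_str get_min_str get_min_str_alt
  rw [loopA_eq_merge]
  rcases pvMerge (pvRle a.toList) (pvRle b.toList) (pvRle c.toList) with _ | l <;> simp
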